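-- pv_equiv track=rewrite | github.com/JoaoSilva2/TTLLCap | src/utils.py | get_cap_indexes
-- ===== SOURCE A (Python) =====
-- def get_cap_indexes(input_ids, caps, decoder_name):
--     indexes = []
--
--     for cap in caps:
--
--         found = False
--         max_sim = 0
--         backup = (0, 1)
--
--         # Remove EOS token from beggining
--         if "opt" in decoder_name:
--             cap = cap[1:]
--         for i in range(len(input_ids)):
--             subset = input_ids[i:len(cap)+i]
--
--             sim = len(set(subset) & set(cap))
--             if sim > max_sim:
--                 sim = max_sim
--                 backup = (i, i+len(cap))
--
--             if subset == cap:
--                 indexes.append((i, i+len(cap)))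
--                 found = True
--                 break
--
--         if found == False:
--             indexes.append(backup)
--
--     return indexes
-- ===== SOURCE B (Python) =====
-- def _match_index(ids, c, end):
--     # first i < end with ids[i:len(c)+i] == c, else None
--     for i in range(end):
--         if ids[i:len(c)+i] == c:
--             return i
--     return None
--
-- def _last_hit(ids, cs):
--     # last position j with ids[j] in cs, else None
--     for j in range(len(ids) - 1, -1, -1):
--         if ids[j] in cs:
--             return j
--     return None
--
-- def _cap_result(ids, c, n):
--     m = len(c)
--     i = _match_index(ids, c, min(n, n - m + 1))
--     if i is not None:
--         return (i, i + m)
--     p = _last_hit(ids, set(c))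
--     return (p, p + m) if p is not None else (0, 1)
--
-- def get_cap_indexes(input_ids, caps, decoder_name):
--     n = len(input_ids)
--     strip = "opt" in decoder_name
--     return [_cap_result(input_ids, cap[1:] if strip else cap, n) for cap in caps]
-- ===== Notes on version B (the rewrite author's own statement) =====
-- stated objective: faster
-- what changed: B splits each cap's search into a plain first-match slice scan (no per-window set work) plus, only when no exact match exists, a single reverse membership scan against a precomputed set of the cap, instead of A's per-window set-intersection bookkeeping; A's buggy 'sim = max_sim' makes its backup the last overlapping window, which equals the last position whose token is in the cap.
import Mathlib
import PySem

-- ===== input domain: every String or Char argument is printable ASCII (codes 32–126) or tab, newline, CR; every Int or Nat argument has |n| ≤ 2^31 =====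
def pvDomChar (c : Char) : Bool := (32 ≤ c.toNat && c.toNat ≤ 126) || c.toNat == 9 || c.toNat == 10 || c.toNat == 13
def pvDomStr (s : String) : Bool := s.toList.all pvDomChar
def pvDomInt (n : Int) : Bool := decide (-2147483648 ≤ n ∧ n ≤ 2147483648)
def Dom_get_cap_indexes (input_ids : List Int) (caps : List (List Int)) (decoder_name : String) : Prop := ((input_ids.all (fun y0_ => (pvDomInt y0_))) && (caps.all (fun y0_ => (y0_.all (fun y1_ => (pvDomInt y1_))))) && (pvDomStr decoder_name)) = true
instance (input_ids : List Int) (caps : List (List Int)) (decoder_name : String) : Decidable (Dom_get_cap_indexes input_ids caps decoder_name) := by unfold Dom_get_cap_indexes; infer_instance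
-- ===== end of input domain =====

-- B replaces A's per-window set-intersection bookkeeping by a plain first-match scan plus, only when no
-- exact match exists, one reverse membership scan against the cap's set (objective: faster).

-- ===== PORT A =====
-- len(set(subset) & set(cap))
def pvInterSize (subset c : List Int) : Int :=
  PySem.Set.len (PySem.Set.inter (PySem.Set.ofList subset) (PySem.Set.ofList c))

-- A's inner 'for i in range(len(input_ids))' loop: state (max_sim, backup), break on exact match;
-- A's 'sim = max_sim' (as written) leaves max_sim unchanged, so max_sim is passed through untouched.
def pvLoopA (ids c : List Int) (max_sim : Int) (backup : Int × Int) (i fuel : Nat) : Int × Int :=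
  match fuel with
  | 0 => backup
  | f+1 =>
    let subset := PySem.List.slice ids (some (i : Int)) (some ((c.length : Int) + (i : Int)))
    let sim : Int := pvInterSize subset c
    -- (new sim, new backup); the new sim is dead, exactly as in A
    let sb : Int × (Int × Int) :=
      if sim > max_sim then (max_sim, ((i : Int), (i : Int) + (c.length : Int))) else (sim, backup)
    if subset = c then ((i : Int), (i : Int) + (c.length : Int))
    else pvLoopA ids c max_sim sb.2 (i+1) f

def get_cap_indexes (input_ids : List Int) (caps : List (List Int)) (decoder_name : String) : List (Int × Int) :=
  caps.foldl (fun indexes cap =>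
    let cap := if PySem.Str.isIn "opt" decoder_name then PySem.List.slice cap (some 1) none else cap
    indexes ++ [pvLoopA input_ids cap 0 (0, 1) 0 input_ids.length]) []

-- ===== PORT B =====
-- first i < end with ids[i:len(c)+i] == c (fuel = end - i)
def pvMatchIndex (ids c : List Int) (i fuel : Nat) : Option Nat :=
  match fuel with
  | 0 => none
  | f+1 =>
    if PySem.List.slice ids (some (i : Int)) (some ((c.length : Int) + (i : Int))) = c then some i
    else pvMatchIndex ids c (i+1) f

-- for j in range(len(ids)-1, -1, -1): if ids[j] in cs  (k = j+1, counting down)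
def pvLastHit (ids : List Int) (cs : PySem.Set Int) : Nat → Option Nat
  | 0 => none
  | k+1 => if cs.contains (ids.getD k 0) then some k else pvLastHit ids cs k

def pvCapB (ids c : List Int) : Int × Int :=
  let n := ids.length
  let m := c.length
  match pvMatchIndex ids c 0 (min (n : Int) ((n : Int) - (m : Int) + 1)).toNat with
  | some i => ((i : Int), (i : Int) + (m : Int))
  | none =>
    match pvLastHit ids (PySem.Set.ofList c) n with
    | some p => ((p : Int), (p : Int) + (m : Int))
    | none => (0, 1)

def get_cap_indexes_alt (input_ids : List Int) (caps : List (List Int)) (decoder_name : String) : List (Int × Int) :=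
  let strip := PySem.Str.isIn "opt" decoder_name
  caps.map (fun cap => pvCapB input_ids (if strip then PySem.List.slice cap (some 1) none else cap))

-- ===== PRECONDITION & SPEC =====
def Spec_get_cap_indexes (input_ids : List Int) (caps : List (List Int)) (decoder_name : String) (out : List (Int × Int)) : Prop := out = get_cap_indexes_alt input_ids caps decoder_name
instance (input_ids : List Int) (caps : List (List Int)) (decoder_name : String) (out : List (Int × Int)) : Decidable (Spec_get_cap_indexes input_ids caps decoder_name out) := by unfold Spec_get_cap_indexes; infer_instance

-- ===== CLAIM (what is proved, stated in full; the proofs are below) =====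
def Claim_equal_get_cap_indexes : Prop := ∀ (input_ids : List Int) (caps : List (List Int)) (decoder_name : String), Dom_get_cap_indexes input_ids caps decoder_name → Spec_get_cap_indexes input_ids caps decoder_name (get_cap_indexes input_ids caps decoder_name)

-- ===== LEMMAS AND PROOFS =====

-- proof-side: last index in [i, i+fuel) whose window has nonempty intersection with c (prefer later)
def pvLastOv (ids c : List Int) (i fuel : Nat) : Option Nat :=
  match fuel with
  | 0 => none
  | f+1 =>
    match pvLastOv ids c (i+1) f with
    | some p => some p
    | none =>
      if 0 < pvInterSize (PySem.List.slice ids (some (i : Int)) (some ((c.length : Int) + (i : Int)))) c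
      then some i else none

-- L1: invariant of A's inner loop (max_sim stays 0, so backup records every window with nonzero overlap)
theorem pvLoopA_eq (ids c : List Int) :
    ∀ (fuel i : Nat) (backup : Int × Int),
      pvLoopA ids c 0 backup i fuel =
        match pvMatchIndex ids c i fuel with
        | some j => ((j : Int), (j : Int) + (c.length : Int))
        | none =>
          match pvLastOv ids c i fuel with
          | some p => ((p : Int), (p : Int) + (c.length : Int))
          | none => backup := by
  intro fuel
  induction fuel with
  | zero => intro i backup; rfl
  | succ f ih =>
    intro i backup
    simp only [pvLoopA, pvMatchIndex, pvLastOv]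
    by_cases hs : PySem.List.slice ids (some (i : Int)) (some ((c.length : Int) + (i : Int))) = c
    · simp [hs]
    · simp only [hs, if_false]
      rw [ih]
      cases hmi : pvMatchIndex ids c (i+1) f with
      | some j => simp
      | none =>
        cases hlo : pvLastOv ids c (i+1) f with
        | some p => simp
        | none =>
          by_cases hov : 0 < pvInterSize (PySem.List.slice ids (some (i : Int)) (some ((c.length : Int) + (i : Int)))) c
          · simp [hov, gt_iff_lt]
          · simp [hov, gt_iff_lt]

-- the slice ids[i:len(c)+i] as drop/take
theorem pvSlice_eq (ids c : List Int) (j : Nat) :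
    PySem.List.slice ids (some (j : Int)) (some ((c.length : Int) + (j : Int))) =
      (ids.drop j).take c.length := by
  rw [add_comm, PySem.List.slice_natCast_add]

theorem pvMatch_none (ids c : List Int) :
    ∀ (f i : Nat), (∀ j, i ≤ j → j < i + f →
      PySem.List.slice ids (some (j : Int)) (some ((c.length : Int) + (j : Int))) ≠ c) →
      pvMatchIndex ids c i f = none := by
  intro f
  induction f with
  | zero => intro i _; rfl
  | succ f ih =>
    intro i h
    simp only [pvMatchIndex]
    rw [if_neg (h i le_rfl (by omega)), ih (i+1) (fun j h1 h2 => h j (by omega) (by omega))]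

theorem pvMatch_trunc (ids c : List Int) :
    ∀ (g f i : Nat), g ≤ f → (∀ j, i + g ≤ j → j < i + f →
      PySem.List.slice ids (some (j : Int)) (some ((c.length : Int) + (j : Int))) ≠ c) →
      pvMatchIndex ids c i f = pvMatchIndex ids c i g := by
  intro g
  induction g with
  | zero => intro f i _ h; exact pvMatch_none ids c f i (fun j h1 h2 => h j (by omega) h2)
  | succ g ih =>
    intro f i hle h
    match f, hle with
    | f+1, _ =>
      simp only [pvMatchIndex]
      by_cases hs : PySem.List.slice ids (some (i : Int)) (some ((c.length : Int) + (i : Int))) = c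
      · rw [if_pos hs, if_pos hs]
      · rw [if_neg hs, if_neg hs, ih f (i+1) (by omega) (fun j h1 h2 => h j (by omega) (by omega))]

-- L2: the match scan may stop at min(n, n-m+1): later windows are shorter than c
theorem pvMatchIndex_trunc (ids c : List Int) :
    pvMatchIndex ids c 0 ids.length =
      pvMatchIndex ids c 0 (min (ids.length : Int) ((ids.length : Int) - (c.length : Int) + 1)).toNat := by
  apply pvMatch_trunc ids c _ _ 0 (by omega)
  intro j h1 h2 heq
  have hl := congrArg List.length heq
  rw [pvSlice_eq] at hl
  simp only [List.length_take, List.length_drop] at hl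
  omega

-- nonempty intersection iff a common element
theorem pvInterSize_pos (s c : List Int) :
    0 < pvInterSize s c ↔ ∃ y, y ∈ s ∧ y ∈ c := by
  show 0 < ((PySem.Set.inter (PySem.Set.ofList s) (PySem.Set.ofList c)).length : Int) ↔ _
  rw [Int.natCast_pos]
  constructor
  · intro hpos
    obtain ⟨y, hy⟩ := List.exists_mem_of_length_pos hpos
    have := (PySem.Set.mem_inter (PySem.Set.ofList s) (PySem.Set.ofList c) y).1 hy
    exact ⟨y, (PySem.Set.mem_ofList s y).1 this.1, (PySem.Set.mem_ofList c y).1 this.2⟩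
  · rintro ⟨y, hs, hc⟩
    exact List.length_pos_of_mem ((PySem.Set.mem_inter _ _ y).2 ⟨(PySem.Set.mem_ofList s y).2 hs, (PySem.Set.mem_ofList c y).2 hc⟩)

-- downward unfolding of pvLastOv
theorem pvLastOv_snoc (ids c : List Int) :
    ∀ (f i : Nat), pvLastOv ids c i (f+1) =
      if 0 < pvInterSize (PySem.List.slice ids (some ((i+f : Nat) : Int)) (some ((c.length : Int) + ((i+f : Nat) : Int)))) c
      then some (i+f) else pvLastOv ids c i f := by
  intro f
  induction f with
  | zero =>
    intro i
    simp only [pvLastOv, Nat.add_zero]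
  | succ f ih =>
    intro i
    show (match pvLastOv ids c (i+1) (f+1) with
      | some p => some p
      | none => if 0 < pvInterSize (PySem.List.slice ids (some (i : Int)) (some ((c.length : Int) + (i : Int)))) c then some i else none) = _
    rw [ih (i+1)]
    have harg : i + 1 + f = i + (f+1) := by omega
    rw [harg]
    by_cases hov : 0 < pvInterSize (PySem.List.slice ids (some ((i + (f+1) : Nat) : Int)) (some ((c.length : Int) + ((i + (f+1) : Nat) : Int)))) c
    · rw [if_pos hov, if_pos hov]
    · rw [if_neg hov, if_neg hov]
      rfl

-- L3: with m ≥ 1, the last overlapping window starts at the last position whose token is in c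
theorem pvLastOv_eq_lastHit (ids c : List Int) (hm : 1 ≤ c.length) :
    pvLastOv ids c 0 ids.length = pvLastHit ids (PySem.Set.ofList c) ids.length := by
  have main : ∀ k, k ≤ ids.length → (∀ t, k ≤ t → t < ids.length → ids.getD t 0 ∉ c) →
      pvLastOv ids c 0 k = pvLastHit ids (PySem.Set.ofList c) k := by
    intro k
    induction k with
    | zero => intro _ _; rfl
    | succ k ih =>
      intro hk hno
      rw [pvLastOv_snoc, Nat.zero_add]
      show _ = if (PySem.Set.ofList c).contains (ids.getD k 0) = true then some k else pvLastHit ids (PySem.Set.ofList c) k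
      by_cases hhit : ids.getD k 0 ∈ c
      · -- the window at k contains ids[k] ∈ c
        have hk' : k < ids.length := by omega
        have hov : 0 < pvInterSize (PySem.List.slice ids (some (k : Int)) (some ((c.length : Int) + (k : Int)))) c := by
          rw [pvInterSize_pos]
          refine ⟨ids.getD k 0, ?_, hhit⟩
          rw [List.getD_eq_getElem ids 0 hk', pvSlice_eq, List.drop_eq_getElem_cons hk']
          cases hcl : c.length with
          | zero => omega
          | succ m => rw [List.take_succ_cons]; exact List.mem_cons_self
        rw [if_pos hov, if_pos ((PySem.Set.contains_iff _ _).2 ((PySem.Set.mem_ofList c _).2 hhit))]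
      · -- no position ≥ k is in c, so the window at k has empty overlap
        have hno' : ∀ t, k ≤ t → t < ids.length → ids.getD t 0 ∉ c := by
          intro t h1 h2
          rcases Nat.eq_or_lt_of_le h1 with h | h
          · rw [← h]; exact hhit
          · exact hno t h h2
        have hov : ¬ 0 < pvInterSize (PySem.List.slice ids (some (k : Int)) (some ((c.length : Int) + (k : Int)))) c := by
          rw [pvInterSize_pos]
          rintro ⟨y, hys, hyc⟩
          rw [pvSlice_eq] at hys
          have hyd : y ∈ ids.drop k := List.mem_of_mem_take hys
          rw [List.mem_iff_getElem] at hyd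
          rcases hyd with ⟨t', ht', hy⟩
          rw [List.getElem_drop] at hy
          have hlen : k + t' < ids.length := by
            have h2 := ht'
            simp only [List.length_drop] at h2
            omega
          refine hno' (k + t') (by omega) hlen ?_
          rw [List.getD_eq_getElem ids 0 hlen, hy]
          exact hyc
        rw [if_neg hov, if_neg (by simp only [PySem.Set.contains_iff, PySem.Set.mem_ofList]; exact hhit),
          ih (by omega) hno']
  exact main ids.length le_rfl (fun t h1 h2 => absurd h2 (by omega))

-- per-cap agreement
theorem pvCap_eq (ids c : List Int) :
    pvLoopA ids c 0 (0, 1) 0 ids.length = pvCapB ids c := by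
  rw [pvLoopA_eq]
  show _ = (match pvMatchIndex ids c 0 (min (ids.length : Int) ((ids.length : Int) - (c.length : Int) + 1)).toNat with
    | some i => ((i : Int), (i : Int) + (c.length : Int))
    | none =>
      match pvLastHit ids (PySem.Set.ofList c) ids.length with
      | some p => ((p : Int), (p : Int) + (c.length : Int))
      | none => ((0 : Int), (1 : Int)))
  rw [← pvMatchIndex_trunc]
  cases hmi : pvMatchIndex ids c 0 ids.length with
  | some j => rfl
  | none =>
    cases hm : c.length with
    | zero =>
      -- the empty cap matches the first window, so no match forces ids = []
      have hc : c = [] := List.length_eq_zero_iff.1 hm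
      have hn : ids.length = 0 := by
        by_contra hn
        have hpos : ids.length ≠ 0 := hn
        cases hl : ids.length with
        | zero => exact hpos hl
        | succ f =>
          have : pvMatchIndex ids c 0 (f+1) = some 0 := by
            simp only [pvMatchIndex]
            rw [if_pos (by rw [pvSlice_eq, hc]; simp)]
          rw [hl] at hmi
          rw [hmi] at this
          cases this
      rw [hn]
      rfl
    | succ m' =>
      rw [pvLastOv_eq_lastHit ids c (by omega)]

-- ===== VERDICT (by name: the statement is the Claim_ definition above) =====
theorem get_cap_indexes_spec : Claim_equal_get_cap_indexes := by
  intro input_ids caps decoder_name _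
  unfold Spec_get_cap_indexes get_cap_indexes get_cap_indexes_alt
  rw [PySem.List.foldl_append_singleton_eq_map]
  exact List.map_congr_left (fun cap _ => pvCap_eq input_ids _)
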